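-- pv_equiv track=rewrite | github.com/alexeygrigorev/merm | src/pymermaid/layout/__init__.py | _remove_cycles
-- ===== SOURCE A (Python) =====
-- from collections import defaultdict
--
-- def _remove_cycles(
--     node_ids: list[str],
--     edges: list[tuple[str, str, int]],
-- ) -> tuple[list[tuple[str, str, int]], set[int]]:
--     """Remove cycles by reversing back-edges found during DFS.
--
--     Returns (acyclic_edges, reversed_original_indices).
--     """
--     succ: dict[str, list[tuple[str, int]]] = defaultdict(list)
--     for s, t, idx in edges:
--         succ[s].append((t, idx))
--
--     WHITE, GRAY, BLACK = 0, 1, 2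
--     color: dict[str, int] = {n: WHITE for n in node_ids}
--     reversed_indices: set[int] = set()
--
--     def dfs(u: str) -> None:
--         color[u] = GRAY
--         for v, idx in succ.get(u, []):
--             if color.get(v, WHITE) == GRAY:
--                 # Back edge -- mark for reversal
--                 reversed_indices.add(idx)
--             elif color.get(v, WHITE) == WHITE:
--                 dfs(v)
--         color[u] = BLACK
--
--     for n in node_ids:
--         if color[n] == WHITE:
--             dfs(n)
--
--     result: list[tuple[str, str, int]] = []
--     for s, t, idx in edges:
--         if idx in reversed_indices:
--             result.append((t, s, idx))
--         else:
--             result.append((s, t, idx))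
--     return result, reversed_indices
-- ===== SOURCE B (Python) =====
-- def _remove_cycles(
--     node_ids: list[str],
--     edges: list[tuple[str, str, int]],
-- ) -> tuple[list[tuple[str, str, int]], set[int]]:
--     """Remove cycles by reversing back-edges found during an iterative DFS.
--
--     Returns (acyclic_edges, reversed_original_indices).
--     """
--     succ: dict[str, list[tuple[str, int]]] = {}
--     for s, t, idx in edges:
--         succ.setdefault(s, []).append((t, idx))
--
--     WHITE, GRAY, BLACK = 0, 1, 2
--     color: dict[str, int] = {n: WHITE for n in node_ids}
--     reversed_indices: set[int] = set()
--
--     for start in node_ids: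
--         if color[start] != WHITE:
--             continue
--         color[start] = GRAY
--         stack = [(start, iter(succ.get(start, ())))]
--         while stack:
--             u, it = stack[-1]
--             entry = next(it, None)
--             if entry is None:
--                 color[u] = BLACK
--                 stack.pop()
--                 continue
--             v, idx = entry
--             c = color.get(v, WHITE)
--             if c == GRAY:
--                 reversed_indices.add(idx)
--             elif c == WHITE:
--                 color[v] = GRAY
--                 stack.append((v, iter(succ.get(v, ()))))
--
--     result = [(t, s, idx) if idx in reversed_indices else (s, t, idx)
--               for s, t, idx in edges]
--     return result, reversed_indices
-- ===== Notes on version B (the rewrite author's own statement) =====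
-- stated objective: alternative
-- what changed: The recursive DFS is replaced by an explicit iterative DFS over a stack of (node, remaining-successors) frames that classifies each successor at pop time and blackens a node only when its frame is exhausted; the final edge rewrite becomes a comprehension/map.
import Mathlib
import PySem

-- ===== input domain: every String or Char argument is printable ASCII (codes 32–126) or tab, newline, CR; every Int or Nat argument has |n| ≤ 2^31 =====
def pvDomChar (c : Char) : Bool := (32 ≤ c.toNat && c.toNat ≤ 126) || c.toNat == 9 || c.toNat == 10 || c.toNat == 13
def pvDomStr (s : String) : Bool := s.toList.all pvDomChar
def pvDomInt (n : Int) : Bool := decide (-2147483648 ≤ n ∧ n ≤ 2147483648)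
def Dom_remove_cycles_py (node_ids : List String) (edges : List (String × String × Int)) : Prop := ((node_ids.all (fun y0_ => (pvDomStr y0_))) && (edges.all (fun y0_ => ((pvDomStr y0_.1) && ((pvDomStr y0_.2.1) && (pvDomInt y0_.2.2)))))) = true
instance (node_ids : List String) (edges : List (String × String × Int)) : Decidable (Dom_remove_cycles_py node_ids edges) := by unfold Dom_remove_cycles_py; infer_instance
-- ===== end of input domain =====

-- B replaces A's recursive DFS by an explicit stack-of-frames iterative DFS (same back-edge set, same cost): objective 'alternative'.


-- shared state: (color dict, reversed-indices set)
abbrev PvSt := PySem.Dict String Int × List Int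

-- setting a node BLACK costs one fuel unit; at fuel 0 the machine stops as-is
def pvPop (u : String) (p : PvSt × Nat) : PvSt × Nat :=
  match p with
  | (st, 0) => (st, 0)
  | (st, f+1) => ((st.1.insert u 2, st.2), f)

theorem pvPop_fuel_le (u : String) (p : PvSt × Nat) : (pvPop u p).2 ≤ p.2 := by
  match p with
  | (st, 0) => simp [pvPop]
  | (st, f+1) => simp [pvPop]

-- ===== PORT A =====
-- recursive DFS of A, made total by a fuel threaded through (returned fuel ≤ given fuel)
def pvLoopA (succ : PySem.Dict String (List (String × Int))) :
    (f : Nat) → List (String × Int) → PvSt → {p : PvSt × Nat // p.2 ≤ f}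
  | f, [], st => ⟨(st, f), le_refl _⟩
  | 0, _ :: _, st => ⟨(st, 0), le_refl _⟩
  | f+1, (v, i) :: rest, (c, r) =>
    if c.getD v 0 = 1 then
      let q := pvLoopA succ f rest (c, PySem.Set.add r i)
      ⟨q.val, le_trans q.property (Nat.le_succ f)⟩
    else if c.getD v 0 = 0 then
      let d := pvLoopA succ f (succ.getD v []) (c.insert v 1, r)
      let p := pvPop v d.val
      let q := pvLoopA succ p.2 rest p.1
      ⟨q.val, le_trans q.property (le_trans (pvPop_fuel_le v d.val) (le_trans d.property (Nat.le_succ f)))⟩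
    else
      let q := pvLoopA succ f rest (c, r)
      ⟨q.val, le_trans q.property (Nat.le_succ f)⟩
termination_by f _ _ => f
decreasing_by
  · omega
  · omega
  · exact Nat.lt_succ_of_le (le_trans (pvPop_fuel_le v d.val) d.property)
  · omega

def pvDfsA (succ : PySem.Dict String (List (String × Int))) (f : Nat) (u : String) (st : PvSt) : PvSt × Nat :=
  pvPop u (pvLoopA succ f (succ.getD u []) (st.1.insert u 1, st.2)).val

def remove_cycles_py (node_ids : List String) (edges : List (String × String × Int)) : (List (String × String × Int)) × List Int :=
  let succ := edges.foldl (fun d p => d.modify p.1 [] (fun l => l ++ [(p.2.1, p.2.2)])) PySem.Dict.empty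
  let color0 := node_ids.foldl (fun d n => d.insert n 0) PySem.Dict.empty
  let fuel := 3 * (node_ids.length + edges.length) + 1
  let fin := node_ids.foldl
    (fun acc n => if acc.1.1.getD n 0 = 0 then pvDfsA succ acc.2 n acc.1 else acc)
    (((color0, ([] : List Int)) : PvSt), fuel)
  let rev := fin.1.2
  (edges.foldl (fun res p =>
      res ++ [if rev.contains p.2.2 then (p.2.1, p.1, p.2.2) else (p.1, p.2.1, p.2.2)]) [],
   rev)

-- ===== PORT B =====
-- iterative DFS of B: stack of (node, remaining successors); every step costs one fuel unit
def pvRunB (succ : PySem.Dict String (List (String × Int))) :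
    Nat → List (String × List (String × Int)) → PvSt → PvSt × Nat
  | 0, _, st => (st, 0)
  | f+1, [], st => (st, f+1)
  | f+1, (u, []) :: frames, st => pvRunB succ f frames (st.1.insert u 2, st.2)
  | f+1, (u, (v, i) :: rest) :: frames, (c, r) =>
    if c.getD v 0 = 1 then pvRunB succ f ((u, rest) :: frames) (c, PySem.Set.add r i)
    else if c.getD v 0 = 0 then
      pvRunB succ f ((v, succ.getD v []) :: (u, rest) :: frames) (c.insert v 1, r)
    else pvRunB succ f ((u, rest) :: frames) (c, r)

def remove_cycles_py_alt (node_ids : List String) (edges : List (String × String × Int)) : (List (String × String × Int)) × List Int :=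
  let succ := edges.foldl (fun d p => d.modify p.1 [] (fun l => l ++ [(p.2.1, p.2.2)])) PySem.Dict.empty
  let color0 := node_ids.foldl (fun d n => d.insert n 0) PySem.Dict.empty
  let fuel := 3 * (node_ids.length + edges.length) + 1
  let fin := node_ids.foldl
    (fun acc n =>
      if acc.1.1.getD n 0 = 0 then
        pvRunB succ acc.2 [(n, succ.getD n [])] (acc.1.1.insert n 1, acc.1.2)
      else acc)
    (((color0, ([] : List Int)) : PvSt), fuel)
  let rev := fin.1.2
  (edges.map (fun p => if rev.contains p.2.2 then (p.2.1, p.1, p.2.2) else p), rev)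

-- ===== PRECONDITION & SPEC =====
def Spec_remove_cycles_py (node_ids : List String) (edges : List (String × String × Int)) (out : (List (String × String × Int)) × List Int) : Prop := out = remove_cycles_py_alt node_ids edges
instance (node_ids : List String) (edges : List (String × String × Int)) (out : (List (String × String × Int)) × List Int) : Decidable (Spec_remove_cycles_py node_ids edges out) := by unfold Spec_remove_cycles_py; infer_instance

-- ===== CLAIM =====
def Claim_equal_remove_cycles_py : Prop := ∀ (node_ids : List String) (edges : List (String × String × Int)), Dom_remove_cycles_py node_ids edges → Spec_remove_cycles_py node_ids edges (remove_cycles_py node_ids edges)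

-- ===== LEMMAS AND PROOFS =====
-- the iterative machine with a frame (u, rem) on top runs exactly the recursive loop body, then pops
theorem pvRunB_frame (succ : PySem.Dict String (List (String × Int))) :
    ∀ (f : Nat) (u : String) (rem : List (String × Int)) (frames : List (String × List (String × Int))) (st : PvSt),
      pvRunB succ f ((u, rem) :: frames) st =
        (fun p => pvRunB succ p.2 frames p.1) (pvPop u (pvLoopA succ f rem st).val) := by
  intro f
  induction f using Nat.strong_induction_on with
  | _ f ih =>
    intro u rem frames st
    match f, rem, st with
    | 0, [], st => simp [pvRunB, pvLoopA, pvPop]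
    | f+1, [], st => simp [pvRunB, pvLoopA, pvPop]
    | 0, (v, i) :: rest, st => simp [pvRunB, pvLoopA, pvPop]
    | f+1, (v, i) :: rest, (c, r) =>
      by_cases h1 : c.getD v 0 = 1
      · simp only [pvRunB, pvLoopA, h1, if_pos]
        exact ih f (Nat.lt_succ_self f) u rest frames (c, PySem.Set.add r i)
      · by_cases h0 : c.getD v 0 = 0
        · simp only [pvRunB, pvLoopA, h0, if_pos]
          rw [ih f (Nat.lt_succ_self f) v (succ.getD v []) ((u, rest) :: frames) (c.insert v 1, r)]
          have hle : (pvPop v (pvLoopA succ f (succ.getD v []) (c.insert v 1, r)).val).2 ≤ f :=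
            le_trans (pvPop_fuel_le _ _) (pvLoopA succ f (succ.getD v []) (c.insert v 1, r)).property
          exact ih _ (Nat.lt_succ_of_le hle) u rest frames _
        · simp only [pvRunB, pvLoopA, h1, h0, ite_false]
          exact ih f (Nat.lt_succ_self f) u rest frames (c, r)

-- running the machine from one start frame is A's dfs call
theorem pvRunB_dfs (succ : PySem.Dict String (List (String × Int))) (f : Nat) (u : String) (st : PvSt) :
    pvRunB succ f [(u, succ.getD u [])] (st.1.insert u 1, st.2) = pvDfsA succ f u st := by
  rw [pvRunB_frame]
  unfold pvDfsA
  set p := pvPop u (pvLoopA succ f (succ.getD u []) (st.1.insert u 1, st.2)).val with hp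
  match p with
  | (st', 0) => simp [pvRunB]
  | (st', f'+1) => simp [pvRunB]

-- ===== VERDICT =====
theorem remove_cycles_py_spec : Claim_equal_remove_cycles_py := by
  intro node_ids edges _
  unfold Spec_remove_cycles_py remove_cycles_py remove_cycles_py_alt
  have hfold :
      (fun (acc : PvSt × Nat) n => if acc.1.1.getD n 0 = 0 then pvDfsA (edges.foldl (fun d p => d.modify p.1 [] (fun l => l ++ [(p.2.1, p.2.2)])) PySem.Dict.empty) acc.2 n acc.1 else acc)
      = (fun (acc : PvSt × Nat) n =>
          if acc.1.1.getD n 0 = 0 then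
            pvRunB (edges.foldl (fun d p => d.modify p.1 [] (fun l => l ++ [(p.2.1, p.2.2)])) PySem.Dict.empty) acc.2
              [(n, (edges.foldl (fun d p => d.modify p.1 [] (fun l => l ++ [(p.2.1, p.2.2)])) PySem.Dict.empty).getD n [])]
              (acc.1.1.insert n 1, acc.1.2)
          else acc) := by
    funext acc n
    rw [pvRunB_dfs]
  simp only [hfold, PySem.List.foldl_append_singleton_eq_map, List.nil_append]
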